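-- pv_equiv track=rewrite | github.com/satwikn07/Task1 | q2.py | split_charater
-- ===== SOURCE A (Python) =====
-- def split_charater(string):
--     string = list(string)
--     lower_chr = []
--     upper_chr = []
--     for i in string:
--         if ord(i) in range(65,91):
--              upper_chr.append(i)
--         else:
--             lower_chr.append(i)
--     string = lower_chr + upper_chr
--     return "".join(string)
-- ===== SOURCE B (Python) =====
-- def split_charater(string):
--     return "".join(sorted(string, key=lambda c: 65 <= ord(c) <= 90))
-- ===== Notes on version B (the rewrite author's own statement) =====
-- stated objective: idiomatic
-- what changed: Replaces the explicit two-bucket partition loop with a single stable sort keyed on the uppercase-ASCII predicate; stability keeps each group's original order, so the result is identical.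
import Mathlib
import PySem

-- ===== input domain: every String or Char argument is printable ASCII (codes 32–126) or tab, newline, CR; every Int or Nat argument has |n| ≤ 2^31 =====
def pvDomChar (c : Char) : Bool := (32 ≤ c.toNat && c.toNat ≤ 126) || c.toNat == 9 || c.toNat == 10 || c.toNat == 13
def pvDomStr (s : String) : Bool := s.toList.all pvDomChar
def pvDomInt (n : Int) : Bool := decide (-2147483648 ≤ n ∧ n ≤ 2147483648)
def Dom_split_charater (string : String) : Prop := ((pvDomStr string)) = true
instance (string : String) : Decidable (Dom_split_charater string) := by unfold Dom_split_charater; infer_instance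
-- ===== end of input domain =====

-- B replaces A's explicit two-bucket partition loop with one stable sort keyed on the
-- uppercase-ASCII predicate (idiomatic; same return value).

-- ===== PORT A =====
def split_charater (string : String) : String :=
  let cs := string.toList
  let st := cs.foldl
    (fun (acc : List Char × List Char) i =>
      if 65 ≤ i.toNat ∧ i.toNat < 91 then (acc.1, acc.2 ++ [i]) else (acc.1 ++ [i], acc.2))
    ([], [])
  String.mk (st.1 ++ st.2)

-- ===== PORT B =====
-- key: Python's bool sorts as 0/1; ported as Nat 0/1 (exact).
def split_charater_alt (string : String) : String :=
  String.mk (PySem.List.sorted string.toList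
    (fun c => if 65 ≤ c.toNat ∧ c.toNat ≤ 90 then (1 : Nat) else 0) false)

-- ===== PRECONDITION & SPEC =====
def Spec_split_charater (string : String) (out : String) : Prop := out = split_charater_alt string
instance (string : String) (out : String) : Decidable (Spec_split_charater string out) := by unfold Spec_split_charater; infer_instance

-- ===== CLAIM (what is proved, stated in full; the proofs are below) =====
def Claim_equal_split_charater : Prop := ∀ (string : String), Dom_split_charater string → Spec_split_charater string (split_charater string)

-- ===== LEMMAS AND PROOFS =====

-- A's predicate, as a Bool
def pvUp (c : Char) : Bool := decide (65 ≤ c.toNat ∧ c.toNat < 91)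

-- B's key equals "if pvUp then 1 else 0"
lemma pvKey_eq (c : Char) :
    (if 65 ≤ c.toNat ∧ c.toNat ≤ 90 then (1 : Nat) else 0) = (if pvUp c then 1 else 0) := by
  unfold pvUp
  by_cases h : 65 ≤ c.toNat ∧ c.toNat < 91
  · rw [if_pos (by omega), if_pos (by simpa using h)]
  · rw [if_neg (by omega), if_neg (by simpa using h)]

-- A's loop computes the two filters
lemma pvA_foldl (cs l u : List Char) :
    cs.foldl
      (fun (acc : List Char × List Char) i =>
        if 65 ≤ i.toNat ∧ i.toNat < 91 then (acc.1, acc.2 ++ [i]) else (acc.1 ++ [i], acc.2))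
      (l, u)
    = (l ++ cs.filter (fun c => !pvUp c), u ++ cs.filter pvUp) := by
  induction cs generalizing l u with
  | nil => simp
  | cons x xs ih =>
    by_cases h : 65 ≤ x.toNat ∧ x.toNat < 91
    · simp only [List.foldl_cons, if_pos h, ih, List.filter_cons]
      have hx : pvUp x = true := by simpa [pvUp] using h
      simp [hx]
    · simp only [List.foldl_cons, if_neg h, ih, List.filter_cons]
      have hx : pvUp x = false := by simpa [pvUp] using h
      simp [hx]

-- inserting into a (false-block ++ true-block) list keeps the shape
lemma pvInsert (x : Char) (l0 l1 : List Char)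
    (h0 : ∀ a ∈ l0, pvUp a = false) (h1 : ∀ a ∈ l1, pvUp a = true) :
    PySem.List.insertBy
      (fun a b => decide ((if pvUp a then (1 : Nat) else 0) < (if pvUp b then 1 else 0))) x (l0 ++ l1)
    = if pvUp x then l0 ++ (l1 ++ [x]) else l0 ++ x :: l1 := by
  by_cases hx : pvUp x
  · rw [if_pos hx]
    rw [PySem.List.insertBy_of_forall_not_before]
    · simp
    · intro y hy
      rcases List.mem_append.mp hy with h | h
      · simp [hx, h0 y h]
      · simp [hx, h1 y h]
  · rw [if_neg hx]
    induction l0 with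
    | nil =>
      cases l1 with
      | nil => simp [PySem.List.insertBy]
      | cons b bs =>
        have hb : pvUp b = true := h1 b (by simp)
        simp [PySem.List.insertBy, hx, hb]
    | cons a as ih =>
      have ha : pvUp a = false := h0 a (by simp)
      simp only [List.cons_append, PySem.List.insertBy, Bool.not_eq_true] at *
      rw [if_neg (by simp [hx, ha])]
      simp [ih (fun y hy => h0 y (by simp [hy]))]

-- the insertion-sort loop computes filter-false ++ filter-true
lemma pvSort_foldl (cs l0 l1 : List Char)
    (h0 : ∀ a ∈ l0, pvUp a = false) (h1 : ∀ a ∈ l1, pvUp a = true) :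
    cs.foldl
      (fun acc x => PySem.List.insertBy
        (fun a b => decide ((if pvUp a then (1 : Nat) else 0) < (if pvUp b then 1 else 0))) x acc)
      (l0 ++ l1)
    = (l0 ++ cs.filter (fun c => !pvUp c)) ++ (l1 ++ cs.filter pvUp) := by
  induction cs generalizing l0 l1 with
  | nil => simp
  | cons x xs ih =>
    simp only [List.foldl_cons, pvInsert x l0 l1 h0 h1, List.filter_cons]
    by_cases hx : pvUp x
    · rw [if_pos hx]
      rw [ih l0 (l1 ++ [x]) h0 (by intro y hy; rcases List.mem_append.mp hy with h | h
                                   · exact h1 y h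
                                   · simp at h; simpa [h] using hx)]
      simp [hx]
    · rw [if_neg hx]
      rw [show l0 ++ x :: l1 = (l0 ++ [x]) ++ l1 by simp]
      rw [ih (l0 ++ [x]) l1 (by intro y hy; rcases List.mem_append.mp hy with h | h
                                · exact h0 y h
                                · simp at h; subst h; simpa using hx) h1]
      simp [hx]

-- ===== VERDICT (by name: the statement is the Claim_ definition above) =====
theorem split_charater_spec : Claim_equal_split_charater := by
  intro s _
  unfold Spec_split_charater split_charater split_charater_alt
  have hkey : (fun c : Char => if 65 ≤ c.toNat ∧ c.toNat ≤ 90 then (1 : Nat) else 0)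
      = (fun c => if pvUp c then 1 else 0) := funext pvKey_eq
  rw [hkey]
  rw [show PySem.List.sorted s.toList (fun c => if pvUp c then (1 : Nat) else 0) false
      = s.toList.foldl
          (fun acc x => PySem.List.insertBy
            (fun a b => decide ((if pvUp a then (1 : Nat) else 0) < (if pvUp b then 1 else 0))) x acc)
          [] from rfl]
  rw [show ([] : List Char) = ([] : List Char) ++ ([] : List Char) from rfl,
      pvSort_foldl s.toList [] [] (by simp) (by simp)]
  simp [pvA_foldl s.toList [] []]
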